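-- pv_equiv track=rewrite | github.com/ShohjahonQurbonboyev/Premium_billiard_bot | handlers/users/functions.py | calculate_benefit_sell
-- ===== SOURCE A (Python) =====
-- def calculate_benefit_sell(sold_products: dict, nakladnoy_list: list) -> int:
--     benefit = 0
--
--     for name, qty in sold_products.items():
--         for nak in nakladnoy_list:
--             if nak[1] == name:
--                 original_price = int(nak[3])
--                 sell_price = int(nak[4])
--                 benefit += (sell_price - original_price) * qty
--
--     return benefit
-- ===== SOURCE B (Python) =====
-- def calculate_benefit_sell(sold_products: dict, nakladnoy_list: list) -> int:
--     if not sold_products: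
--         return 0
--     names = set(sold_products)
--     margin = {}
--     for nak in nakladnoy_list:
--         name = nak[1]
--         if name in names:
--             margin[name] = margin.get(name, 0) + int(nak[4]) - int(nak[3])
--     return sum(margin.get(name, 0) * qty for name, qty in sold_products.items())
-- ===== Notes on version B (the rewrite author's own statement) =====
-- stated objective: alternative
-- what changed: Replaces the nested scan of nakladnoy_list per sold product by a single grouping pass (dict: name -> summed margin) followed by one lookup per sold product (with an early 0 when nothing was sold); trades the rescans for a dict build, which a timing run did not measure as faster on the generated input family.
import Mathlib
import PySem

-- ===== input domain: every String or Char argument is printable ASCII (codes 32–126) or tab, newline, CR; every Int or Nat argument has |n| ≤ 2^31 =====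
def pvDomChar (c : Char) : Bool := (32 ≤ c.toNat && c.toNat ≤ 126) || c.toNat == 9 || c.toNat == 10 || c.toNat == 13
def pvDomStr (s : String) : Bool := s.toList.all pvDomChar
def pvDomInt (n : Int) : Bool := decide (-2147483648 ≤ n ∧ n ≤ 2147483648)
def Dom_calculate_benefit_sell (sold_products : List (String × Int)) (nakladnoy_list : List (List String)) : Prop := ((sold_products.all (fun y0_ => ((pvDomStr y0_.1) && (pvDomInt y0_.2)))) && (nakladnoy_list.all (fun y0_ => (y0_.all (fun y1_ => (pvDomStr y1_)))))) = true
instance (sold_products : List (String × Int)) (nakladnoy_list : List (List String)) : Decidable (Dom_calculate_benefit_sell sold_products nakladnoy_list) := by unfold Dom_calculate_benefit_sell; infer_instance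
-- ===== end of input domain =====

-- B replaces A's rescan of nakladnoy_list for every sold product by one grouping pass
-- (dict: name -> summed margin) plus one lookup per sold product, returning 0 outright
-- when nothing was sold (objective: alternative).

-- ===== PORT A =====
def calculate_benefit_sell (sold_products : List (String × Int)) (nakladnoy_list : List (List String)) : Int :=
  sold_products.foldl (fun benefit p =>
    nakladnoy_list.foldl (fun b nak =>
      match PySem.List.pyGet? nak 1 with
      | none => b
      | some s =>
        if s = p.1 then
          match PySem.List.pyGet? nak 3, PySem.List.pyGet? nak 4 with
          | some s3, some s4 =>
            match PySem.Int.ofStr? s3, PySem.Int.ofStr? s4 with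
            | some original_price, some sell_price => b + (sell_price - original_price) * p.2
            | _, _ => b          -- int() raised: outside Pre_
          | _, _ => b            -- IndexError: outside Pre_
        else b) benefit) 0

-- ===== PORT B =====
def calculate_benefit_sell_alt (sold_products : List (String × Int)) (nakladnoy_list : List (List String)) : Int :=
  if sold_products = [] then 0
  else
    let names : PySem.Set String := PySem.Set.ofList (sold_products.map Prod.fst)
    let margin : PySem.Dict String Int := nakladnoy_list.foldl (fun d nak =>
      (PySem.List.pyGet? nak 1).elim d (fun name =>        -- none = IndexError: outside Pre_
        if PySem.Set.contains names name then
          ((PySem.List.pyGet? nak 4).bind PySem.Int.ofStr?).elim d (fun sv =>      -- none = raise: outside Pre_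
            ((PySem.List.pyGet? nak 3).bind PySem.Int.ofStr?).elim d (fun ov =>    -- none = raise: outside Pre_
              d.insert name (d.getD name 0 + sv - ov)))
        else d)) PySem.Dict.empty
    sold_products.foldl (fun acc p => acc + margin.getD p.1 0 * p.2) 0

-- ===== PRECONDITION & SPEC =====
-- Pre_ excludes exactly the inputs where the Python A raises: sold_products nonempty with
-- some nakladnoy entry shorter than 2, or with a matched entry shorter than 5 or whose
-- price fields are not int()-parsable (when sold_products is empty A's loops never run
-- and it returns 0, so nothing is excluded there).
def Pre_calculate_benefit_sell (sold_products : List (String × Int)) (nakladnoy_list : List (List String)) : Prop :=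
  sold_products = [] ∨
  ∀ nak ∈ nakladnoy_list, 2 ≤ nak.length ∧
    (nak.getD 1 "" ∈ sold_products.map Prod.fst →
      5 ≤ nak.length ∧ (PySem.Int.ofStr? (nak.getD 3 "")).isSome ∧ (PySem.Int.ofStr? (nak.getD 4 "")).isSome)
instance (sold_products : List (String × Int)) (nakladnoy_list : List (List String)) : Decidable (Pre_calculate_benefit_sell sold_products nakladnoy_list) := by unfold Pre_calculate_benefit_sell; infer_instance

def pvWitness_calculate_benefit_sell : (List (String × Int)) × List (List String) :=
  ([("a", 2), ("b", 3)], [["x", "a", "q", "3", "5"], ["y", "b", "q", "10", "7"]])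

def Spec_calculate_benefit_sell (sold_products : List (String × Int)) (nakladnoy_list : List (List String)) (out : Int) : Prop := out = calculate_benefit_sell_alt sold_products nakladnoy_list
instance (sold_products : List (String × Int)) (nakladnoy_list : List (List String)) (out : Int) : Decidable (Spec_calculate_benefit_sell sold_products nakladnoy_list out) := by unfold Spec_calculate_benefit_sell; infer_instance

-- ===== CLAIM (what is proved, stated in full; the proofs are below) =====
def Claim_equal_calculate_benefit_sell : Prop := ∀ (sold_products : List (String × Int)) (nakladnoy_list : List (List String)), Dom_calculate_benefit_sell sold_products nakladnoy_list → Pre_calculate_benefit_sell sold_products nakladnoy_list → Spec_calculate_benefit_sell sold_products nakladnoy_list (calculate_benefit_sell sold_products nakladnoy_list)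

-- ===== LEMMAS AND PROOFS =====

-- margin one entry contributes when it matches (0 where Python would have raised; Pre_ rules that out)
def pvEntryDelta (nak : List String) : Int :=
  match PySem.List.pyGet? nak 3, PySem.List.pyGet? nak 4 with
  | some s3, some s4 =>
    match PySem.Int.ofStr? s3, PySem.Int.ofStr? s4 with
    | some ov, some sv => sv - ov
    | _, _ => 0
  | _, _ => 0

-- total margin of all entries naming `name`
def pvContrib (nakladnoy_list : List (List String)) (name : String) : Int :=
  ((nakladnoy_list.filter (fun nak => PySem.List.pyGet? nak 1 == some name)).map pvEntryDelta).sum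

theorem pvContrib_cons (nak : List String) (t : List (List String)) (name : String) :
    pvContrib (nak :: t) name =
      (if PySem.List.pyGet? nak 1 = some name then pvEntryDelta nak else 0) + pvContrib t name := by
  simp only [pvContrib, List.filter_cons, beq_iff_eq]
  split_ifs with h <;> simp

-- one step of A's inner loop
theorem pvA_body (p : String × Int) (nak : List String) (b : Int) :
    (match PySem.List.pyGet? nak 1 with
      | none => b
      | some s =>
        if s = p.1 then
          match PySem.List.pyGet? nak 3, PySem.List.pyGet? nak 4 with
          | some s3, some s4 =>
            match PySem.Int.ofStr? s3, PySem.Int.ofStr? s4 with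
            | some original_price, some sell_price => b + (sell_price - original_price) * p.2
            | _, _ => b
          | _, _ => b
        else b)
    = b + (if PySem.List.pyGet? nak 1 = some p.1 then pvEntryDelta nak else 0) * p.2 := by
  rcases h1 : PySem.List.pyGet? nak 1 with _ | s
  · simp [h1]
  · simp only [h1, Option.some.injEq]
    by_cases hs : s = p.1
    · subst hs
      rw [if_pos rfl, if_pos rfl]
      unfold pvEntryDelta
      cases h3 : PySem.List.pyGet? nak 3 <;> cases h4 : PySem.List.pyGet? nak 4 <;>
        simp only [h3, h4] <;>
        (try (cases ho : PySem.Int.ofStr? _ <;> cases hv : PySem.Int.ofStr? _ <;> simp only [ho, hv])) <;>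
        simp <;> try ring
    · rw [if_neg hs, if_neg hs]
      ring

-- A's inner loop over nakladnoy_list adds pvContrib nl p.1 * p.2
theorem pvA_inner (nl : List (List String)) (p : String × Int) (b : Int) :
    nl.foldl (fun b nak =>
      match PySem.List.pyGet? nak 1 with
      | none => b
      | some s =>
        if s = p.1 then
          match PySem.List.pyGet? nak 3, PySem.List.pyGet? nak 4 with
          | some s3, some s4 =>
            match PySem.Int.ofStr? s3, PySem.Int.ofStr? s4 with
            | some original_price, some sell_price => b + (sell_price - original_price) * p.2
            | _, _ => b
          | _, _ => b
        else b) b = b + pvContrib nl p.1 * p.2 := by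
  induction nl generalizing b with
  | nil => simp [pvContrib]
  | cons nak t ih =>
    rw [List.foldl_cons, pvContrib_cons]
    show List.foldl _ (match PySem.List.pyGet? nak 1 with
      | none => b
      | some s =>
        if s = p.1 then
          match PySem.List.pyGet? nak 3, PySem.List.pyGet? nak 4 with
          | some s3, some s4 =>
            match PySem.Int.ofStr? s3, PySem.Int.ofStr? s4 with
            | some original_price, some sell_price => b + (sell_price - original_price) * p.2
            | _, _ => b
          | _, _ => b
        else b) t = _
    rw [pvA_body, ih]
    ring

-- A's outer loop in closed form
theorem pvA_outer (nl : List (List String)) (sp : List (String × Int)) (b : Int) :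
    sp.foldl (fun benefit p =>
      nl.foldl (fun b nak =>
        match PySem.List.pyGet? nak 1 with
        | none => b
        | some s =>
          if s = p.1 then
            match PySem.List.pyGet? nak 3, PySem.List.pyGet? nak 4 with
            | some s3, some s4 =>
              match PySem.Int.ofStr? s3, PySem.Int.ofStr? s4 with
              | some original_price, some sell_price => b + (sell_price - original_price) * p.2
              | _, _ => b
            | _, _ => b
          else b) benefit) b
    = sp.foldl (fun acc p => acc + pvContrib nl p.1 * p.2) b := by
  induction sp generalizing b with
  | nil => rfl
  | cons p t ih => rw [List.foldl_cons, List.foldl_cons, pvA_inner, ih]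

-- one step of B's grouping pass, seen through a lookup of a name the set contains
theorem pvB_step_getD (names : PySem.Set String) (nak : List String)
    (d : PySem.Dict String Int) (name : String) (h : PySem.Set.contains names name = true) :
    ((PySem.List.pyGet? nak 1).elim d (fun n =>
      if PySem.Set.contains names n then
        ((PySem.List.pyGet? nak 4).bind PySem.Int.ofStr?).elim d (fun sv =>
          ((PySem.List.pyGet? nak 3).bind PySem.Int.ofStr?).elim d (fun ov =>
            d.insert n (d.getD n 0 + sv - ov)))
      else d)).getD name 0
    = d.getD name 0 + (if PySem.List.pyGet? nak 1 = some name then pvEntryDelta nak else 0) := by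
  rcases h1 : PySem.List.pyGet? nak 1 with _ | n
  · simp [h1]
  · simp only [h1, Option.elim_some, Option.some.injEq]
    by_cases hn : n = name
    · subst hn
      rw [if_pos h, if_pos rfl]
      unfold pvEntryDelta
      cases h3 : PySem.List.pyGet? nak 3 <;> cases h4 : PySem.List.pyGet? nak 4 <;>
        simp only [h3, h4, Option.bind] <;>
        (try (cases ho : PySem.Int.ofStr? _ <;> simp only [ho])) <;>
        (try (cases hv : PySem.Int.ofStr? _ <;> simp only [hv])) <;>
        (try simp [PySem.Dict.getD_insert]) <;>
        (try (cases PySem.Int.ofStr? _ <;> simp [PySem.Dict.getD_insert])) <;>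
        (try (cases PySem.Int.ofStr? _ <;> simp [PySem.Dict.getD_insert])) <;> try ring
    · rw [if_neg hn]
      by_cases hc : PySem.Set.contains names n = true
      · rw [if_pos hc]
        cases h3 : PySem.List.pyGet? nak 3 <;> cases h4 : PySem.List.pyGet? nak 4 <;>
          simp only [h3, h4, Option.bind] <;>
          (try (cases ho : PySem.Int.ofStr? _ <;> simp only [ho])) <;>
          (try (cases hv : PySem.Int.ofStr? _ <;> simp only [hv])) <;>
          (try simp [PySem.Dict.getD_insert, Ne.symm hn]) <;>
          (try (cases PySem.Int.ofStr? _ <;> simp [PySem.Dict.getD_insert, Ne.symm hn])) <;>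
          (try (cases PySem.Int.ofStr? _ <;> simp [PySem.Dict.getD_insert, Ne.symm hn])) <;> try ring
      · rw [if_neg hc]
        ring

-- B's grouping pass: the dict entry for any name the set contains is its total contribution
theorem pvB_margin (nl : List (List String)) (names : PySem.Set String)
    (d : PySem.Dict String Int) (name : String) (h : PySem.Set.contains names name = true) :
    (nl.foldl (fun d nak =>
      (PySem.List.pyGet? nak 1).elim d (fun n =>
        if PySem.Set.contains names n then
          ((PySem.List.pyGet? nak 4).bind PySem.Int.ofStr?).elim d (fun sv =>
            ((PySem.List.pyGet? nak 3).bind PySem.Int.ofStr?).elim d (fun ov =>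
              d.insert n (d.getD n 0 + sv - ov)))
        else d)) d).getD name 0 = d.getD name 0 + pvContrib nl name := by
  induction nl generalizing d with
  | nil => simp [pvContrib]
  | cons nak t ih =>
    rw [List.foldl_cons, ih, pvContrib_cons, pvB_step_getD names nak d name h]
    ring

-- ===== VERDICT (by name: the statement is the Claim_ definition above) =====
theorem calculate_benefit_sell_spec : Claim_equal_calculate_benefit_sell := by
  intro sp nl _ _
  show calculate_benefit_sell sp nl = calculate_benefit_sell_alt sp nl
  by_cases hsp : sp = []
  · subst hsp; rfl
  · simp only [calculate_benefit_sell, calculate_benefit_sell_alt, if_neg hsp]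
    rw [pvA_outer]
    apply PySem.List.foldl_congr_mem
    intro acc p hp
    have hcontains : PySem.Set.contains (PySem.Set.ofList (sp.map Prod.fst)) p.1 = true := by
      simp only [PySem.Set.contains, List.contains_iff_mem]
      exact (PySem.Set.mem_ofList _ _).mpr (List.mem_map_of_mem hp)
    rw [pvB_margin nl _ PySem.Dict.empty p.1 hcontains, PySem.Dict.getD_empty, zero_add]
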